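-- pv_equiv track=rewrite | github.com/SciSoulGalek/programming_principles_2 | Lab3/1.8function.py | has_007
-- ===== SOURCE A (Python) =====
-- def has_007(numbers_list):
--     zero_count = 0
--     for i in range(len(numbers_list)):
--         if numbers_list[i] == 0:
--             zero_count += 1
--         if zero_count >= 2 and numbers_list[i] == 7:
--             return True
--     return False
-- ===== SOURCE B (Python) =====
-- def has_007(numbers_list):
--     # Locate the first and second zeros by list.index(), then
--     # membership-test 7 in the slice strictly after the second zero.
--     try:
--         first = numbers_list.index(0)
--         second = numbers_list.index(0, first + 1)
--     except ValueError:
--         return False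
--     return 7 in numbers_list[second + 1:]
-- ===== Notes on version B (the rewrite author's own statement) =====
-- stated objective: idiomatic
-- what changed: Replaces A's single stateful counter-pass (checking the 7-condition at every element) with a staged search: two list.index() calls locate the first and second zero, then a slice membership test '7 in numbers_list[second+1:]' searches the tail.
import Mathlib
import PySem

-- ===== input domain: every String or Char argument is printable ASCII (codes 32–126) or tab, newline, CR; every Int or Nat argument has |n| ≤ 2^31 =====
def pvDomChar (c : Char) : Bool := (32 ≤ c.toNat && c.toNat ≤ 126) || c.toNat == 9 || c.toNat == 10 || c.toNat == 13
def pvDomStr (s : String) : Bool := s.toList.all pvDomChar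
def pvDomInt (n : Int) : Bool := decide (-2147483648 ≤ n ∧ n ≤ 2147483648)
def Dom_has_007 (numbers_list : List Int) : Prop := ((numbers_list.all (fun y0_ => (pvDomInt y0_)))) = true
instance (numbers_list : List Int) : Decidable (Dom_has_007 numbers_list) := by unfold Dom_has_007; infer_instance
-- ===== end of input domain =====

-- B restructures A's single counter-pass as a staged search: two index() lookups locate the second zero, then a slice membership test for 7 (idiomatic, same cost).


-- ===== PORT A =====
-- loop over the elements (the index is only used to fetch numbers_list[i]) carrying zero_count
def pvLoopA (l : List Int) (zero_count : Int) : Bool :=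
  match l with
  | [] => false
  | x :: xs =>
    let zc := if x = 0 then zero_count + 1 else zero_count
    if 2 ≤ zc ∧ x = 7 then true else pvLoopA xs zc

def has_007 (numbers_list : List Int) : Bool := pvLoopA numbers_list 0

-- ===== PORT B =====
-- numbers_list.index(0, first + 1) = (first+1) + relative index of 0 in the tail after first;
-- '7 in numbers_list[second+1:]' with a nonnegative index is contains on List.drop (second+1)
def has_007_alt (numbers_list : List Int) : Bool :=
  match PySem.List.index? numbers_list 0 with
  | none => false                              -- first index() raises ValueError → return False
  | some first =>
    match PySem.List.index? (numbers_list.drop (first + 1)) 0 with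
    | none => false                            -- second index() raises ValueError → return False
    | some j =>
      let second := first + 1 + j
      (numbers_list.drop (second + 1)).contains 7

-- ===== PRECONDITION & SPEC =====
def Spec_has_007 (numbers_list : List Int) (out : Bool) : Prop := out = has_007_alt numbers_list
instance (numbers_list : List Int) (out : Bool) : Decidable (Spec_has_007 numbers_list out) := by unfold Spec_has_007; infer_instance

-- ===== CLAIM (what is proved, stated in full; the proofs are below) =====
def Claim_equal_has_007 : Prop := ∀ (numbers_list : List Int), Dom_has_007 numbers_list → Spec_has_007 numbers_list (has_007 numbers_list)

-- ===== LEMMAS AND PROOFS =====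

-- once zero_count ≥ 2, A's loop is exactly a membership test for 7
theorem pvLoopA_ge_two (l : List Int) (zc : Int) (h : 2 ≤ zc) : pvLoopA l zc = l.contains 7 := by
  induction l generalizing zc with
  | nil => simp [pvLoopA]
  | cons x xs ih =>
    simp only [pvLoopA, List.contains_cons]
    by_cases hx : x = 0
    · have h7 : ¬ (2 ≤ (if x = 0 then zc + 1 else zc) ∧ x = 7) := by
        simp [hx]
      rw [if_neg h7, ih _ (by simp [hx]; omega)]
      simp [hx]
    · by_cases h7 : x = 7
      · simp [h7, h]
      · have : ¬ (2 ≤ (if x = 0 then zc + 1 else zc) ∧ x = 7) := by simp [h7]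
        rw [if_neg this, if_neg hx, ih _ h]
        simp [beq_iff_eq]
        intro he; exact absurd he.symm h7

-- with one zero already seen, A's loop is: find the next zero, then contains-7 after it
theorem pvLoopA_one (l : List Int) :
    pvLoopA l 1 = (match PySem.List.index? l 0 with
                   | none => false
                   | some j => (l.drop (j + 1)).contains 7) := by
  induction l with
  | nil => simp [pvLoopA, PySem.List.index?]
  | cons x xs ih =>
    by_cases hx : x = 0
    · subst hx
      have hA : pvLoopA ((0 : Int) :: xs) 1 = pvLoopA xs 2 := by
        norm_num [pvLoopA]
      rw [hA, PySem.List.index?_cons_self, pvLoopA_ge_two xs 2 le_rfl]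
      rfl
    · have hA : pvLoopA (x :: xs) 1 = pvLoopA xs 1 := by
        norm_num [pvLoopA, hx]
      rw [hA, PySem.List.index?_cons_of_ne xs hx, ih]
      cases hidx : PySem.List.index? xs 0 with
      | none => simp only [Option.map_none]
      | some j =>
        simp only [Option.map_some]
        rw [show List.drop (j + 1 + 1) (x :: xs) = List.drop (j + 1) xs from rfl]

-- A's loop from zero_count = 0 equals B's staged search
theorem pvLoopA_zero_eq_alt (l : List Int) : pvLoopA l 0 = has_007_alt l := by
  unfold has_007_alt
  induction l with
  | nil => simp [pvLoopA, PySem.List.index?]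
  | cons x xs ih =>
    by_cases hx : x = 0
    · subst hx
      have hA : pvLoopA ((0 : Int) :: xs) 0 = pvLoopA xs 1 := by
        norm_num [pvLoopA]
      rw [hA, PySem.List.index?_cons_self, pvLoopA_one]
      show _ = (match PySem.List.index? xs 0 with
                | none => false
                | some j => (List.drop (0 + 1 + j + 1) ((0 : Int) :: xs)).contains 7)
      cases hidx : PySem.List.index? xs 0 with
      | none => rfl
      | some j =>
        show (List.drop (j + 1) xs).contains 7
           = (List.drop (0 + 1 + j + 1) ((0 : Int) :: xs)).contains 7
        rw [show List.drop (0 + 1 + j + 1) ((0 : Int) :: xs) = List.drop (0 + 1 + j) xs from rfl,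
            show 0 + 1 + j = j + 1 by omega]
    · have hA : pvLoopA (x :: xs) 0 = pvLoopA xs 0 := by
        norm_num [pvLoopA, hx]
      rw [hA, PySem.List.index?_cons_of_ne xs hx, ih]
      cases hidx : PySem.List.index? xs 0 with
      | none => simp only [Option.map_none]
      | some first =>
        simp only [Option.map_some]
        rw [show List.drop (first + 1 + 1) (x :: xs) = List.drop (first + 1) xs from rfl]
        cases hidx2 : PySem.List.index? (xs.drop (first + 1)) 0 with
        | none => rfl
        | some j =>
          show (List.drop (first + 1 + j + 1) xs).contains 7
             = (List.drop (first + 1 + 1 + j + 1) (x :: xs)).contains 7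
          rw [show List.drop (first + 1 + 1 + j + 1) (x :: xs)
                = List.drop (first + 1 + 1 + j) xs from rfl,
              show first + 1 + 1 + j = first + 1 + j + 1 by omega]

-- ===== VERDICT (by name: the statement is the Claim_ definition above) =====
theorem has_007_spec : Claim_equal_has_007 := by
  intro l _
  unfold Spec_has_007 has_007
  exact pvLoopA_zero_eq_alt l
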